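-- pv_equiv track=rewrite | github.com/FriedStan/PSCP | grader_machine.py | selector_machine
-- ===== SOURCE A (Python) =====
-- def even_finder(num, pass_text, pass_sum):
--     """Find even number"""
--     if num % 2 == 0:
--         pass_text += " " + str(num)
--         pass_sum += num
--     else:
--         pass
--     return pass_text, pass_sum
--
-- def selector_machine(start_inp, end_inp):
--     """select the even number from start_inp to end_inp """
--     pass_text = ""
--     pass_sum = 0
--     if end_inp >= start_inp:
--         for num in range(start_inp, end_inp + 1, 1):
--             pass_text, pass_sum = even_finder(num, pass_text, pass_sum)
--     else:
--         for num in range(start_inp, end_inp - 1, -1):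
--             pass_text, pass_sum = even_finder(num, pass_text, pass_sum)
--     return "pass :{}\n".format(pass_text) +\
--            "Sum : {}".format(pass_sum)
-- ===== SOURCE B (Python) =====
-- def selector_machine(start_inp, end_inp):
--     """select the even number from start_inp to end_inp """
--     if end_inp >= start_inp:
--         first = start_inp if start_inp % 2 == 0 else start_inp + 1
--         evens = range(first, end_inp + 1, 2)
--     else:
--         first = start_inp if start_inp % 2 == 0 else start_inp - 1
--         evens = range(first, end_inp - 1, -2)
--     pass_text = ""
--     pass_sum = 0
--     for num in evens:
--         pass_text += " " + str(num)
--         pass_sum += num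
--     return "pass :{}\nSum : {}".format(pass_text, pass_sum)
-- ===== Notes on version B (the rewrite author's own statement) =====
-- stated objective: faster
-- what changed: B computes the first even endpoint and iterates with range step +/-2 directly over the even numbers, removing the per-element parity test and halving the iterations; the format string is merged into one.
import Mathlib
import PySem

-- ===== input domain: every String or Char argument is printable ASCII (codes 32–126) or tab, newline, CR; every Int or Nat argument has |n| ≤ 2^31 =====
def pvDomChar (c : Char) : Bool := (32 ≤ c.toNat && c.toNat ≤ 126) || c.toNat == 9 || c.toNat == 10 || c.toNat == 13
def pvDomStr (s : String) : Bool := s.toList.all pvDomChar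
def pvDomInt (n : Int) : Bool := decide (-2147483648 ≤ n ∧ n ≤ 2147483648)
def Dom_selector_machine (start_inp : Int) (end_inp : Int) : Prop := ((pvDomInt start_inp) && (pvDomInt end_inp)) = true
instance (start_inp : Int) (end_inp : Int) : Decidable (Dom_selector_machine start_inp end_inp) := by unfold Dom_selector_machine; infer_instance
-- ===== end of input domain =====

-- B enumerates the even numbers directly with a step-2 range (no per-element parity branch, half the iterations); objective: faster (constant factor).

-- ===== PORT A =====
def even_finder (num : Int) (pass_text : String) (pass_sum : Int) : String × Int :=
  if PySem.Int.mod num 2 == 0 then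
    (pass_text ++ (" " ++ PySem.Int.toStr num), pass_sum + num)
  else
    (pass_text, pass_sum)

def selector_machine (start_inp : Int) (end_inp : Int) : String :=
  let st :=
    if end_inp ≥ start_inp then
      (PySem.List.pyRange start_inp (end_inp + 1) 1).foldl
        (fun (s : String × Int) num => even_finder num s.1 s.2) ("", 0)
    else
      (PySem.List.pyRange start_inp (end_inp - 1) (-1)).foldl
        (fun (s : String × Int) num => even_finder num s.1 s.2) ("", 0)
  ("pass :" ++ st.1 ++ "\n") ++ ("Sum : " ++ PySem.Int.toStr st.2)

-- ===== PORT B =====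
def selector_machine_alt (start_inp : Int) (end_inp : Int) : String :=
  let evens :=
    if end_inp ≥ start_inp then
      PySem.List.pyRange
        (if PySem.Int.mod start_inp 2 == 0 then start_inp else start_inp + 1)
        (end_inp + 1) 2
    else
      PySem.List.pyRange
        (if PySem.Int.mod start_inp 2 == 0 then start_inp else start_inp - 1)
        (end_inp - 1) (-2)
  let st := evens.foldl
    (fun (s : String × Int) num => (s.1 ++ (" " ++ PySem.Int.toStr num), s.2 + num)) ("", 0)
  "pass :" ++ st.1 ++ "\nSum : " ++ PySem.Int.toStr st.2

-- ===== PRECONDITION & SPEC =====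
def Spec_selector_machine (start_inp : Int) (end_inp : Int) (out : String) : Prop := out = selector_machine_alt start_inp end_inp
instance (start_inp : Int) (end_inp : Int) (out : String) : Decidable (Spec_selector_machine start_inp end_inp out) := by unfold Spec_selector_machine; infer_instance

-- ===== CLAIM (what is proved, stated in full; the proofs are below) =====
def Claim_equal_selector_machine : Prop := ∀ (start_inp : Int) (end_inp : Int), Dom_selector_machine start_inp end_inp → Spec_selector_machine start_inp end_inp (selector_machine start_inp end_inp)

-- ===== LEMMAS AND PROOFS =====

theorem pyRange_two_nil (a b : Int) (h : b ≤ a) : PySem.List.pyRange a b 2 = [] := by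
  rw [PySem.List.pyRange_of_pos _ _ (by norm_num)]
  rw [if_neg (by omega)]
  simp

theorem pyRange_two_cons (a b : Int) (h : a < b) :
    PySem.List.pyRange a b 2 = a :: PySem.List.pyRange (a + 2) b 2 := by
  rw [PySem.List.pyRange_of_pos _ _ (by norm_num : (0:Int) < 2),
      PySem.List.pyRange_of_pos _ _ (by norm_num : (0:Int) < 2)]
  rw [if_pos h]
  by_cases h2 : a + 2 < b
  · rw [if_pos h2]
    have hc : ((b - a + 2 - 1) / 2).toNat = ((b - (a + 2) + 2 - 1) / 2).toNat + 1 := by omega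
    rw [hc, List.range_succ_eq_map]
    simp only [List.map_cons, List.map_map]
    refine congrArg₂ List.cons (by push_cast; ring) ?_
    refine List.map_congr_left ?_
    intro k _
    simp only [Function.comp_apply]
    push_cast
    ring
  · rw [if_neg h2]
    have hc : ((b - a + 2 - 1) / 2).toNat = 1 := by omega
    simp [hc]

theorem pyRange_neg_two_def (a b : Int) :
    PySem.List.pyRange a b (-2) =
    List.map (fun k : Nat => a + (-2) * (k : Int))
      (List.range (if b < a then ((a - b + 2 - 1) / 2).toNat else 0)) := by
  simp only [PySem.List.pyRange]
  rw [if_neg (by norm_num : ¬ (-2:Int) = 0), if_neg (by norm_num : ¬ (0:Int) < -2)]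
  simp only [neg_neg]

theorem pyRange_neg_two_nil (a b : Int) (h : a ≤ b) : PySem.List.pyRange a b (-2) = [] := by
  rw [pyRange_neg_two_def, if_neg (by omega)]
  simp

theorem pyRange_neg_two_cons (a b : Int) (h : b < a) :
    PySem.List.pyRange a b (-2) = a :: PySem.List.pyRange (a - 2) b (-2) := by
  rw [pyRange_neg_two_def, pyRange_neg_two_def, if_pos h]
  by_cases h2 : b < a - 2
  · rw [if_pos h2]
    have hc : ((a - b + 2 - 1) / 2).toNat = ((a - 2 - b + 2 - 1) / 2).toNat + 1 := by omega
    rw [hc, List.range_succ_eq_map]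
    simp only [List.map_cons, List.map_map]
    refine congrArg₂ List.cons (by push_cast; ring) ?_
    refine List.map_congr_left ?_
    intro k _
    simp only [Function.comp_apply]
    push_cast
    ring
  · rw [if_neg h2]
    have hc : ((a - b + 2 - 1) / 2).toNat = 1 := by omega
    simp [hc]

-- filter of the ascending unit-step range is the step-2 range from the first even
theorem asc_filter (n : Nat) : ∀ a b : Int, (b - a).toNat ≤ n →
    (PySem.List.pyRange a b 1).filter (fun x => PySem.Int.mod x 2 == 0) =
    PySem.List.pyRange (if PySem.Int.mod a 2 == 0 then a else a + 1) b 2 := by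
  induction n with
  | zero =>
    intro a b hn
    have hba : b ≤ a := by omega
    rw [PySem.List.pyRange_one_eq_nil hba]
    split <;> rw [pyRange_two_nil _ _ (by omega)] <;> rfl
  | succ m ih =>
    intro a b hn
    by_cases hab : a < b
    · have hmod : PySem.Int.mod a 2 = a % 2 := PySem.Int.mod_eq_emod_of_pos (by norm_num)
      have hmod1 : PySem.Int.mod (a + 1) 2 = (a + 1) % 2 := PySem.Int.mod_eq_emod_of_pos (by norm_num)
      rw [PySem.List.pyRange_one_cons hab, List.filter_cons]
      by_cases he : a % 2 = 0
      · have hcond : (PySem.Int.mod a 2 == 0) = true := by simp only [hmod, beq_iff_eq]; omega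
        have hcond1 : (PySem.Int.mod (a + 1) 2 == 0) = false := by
          simp only [hmod1, beq_eq_false_iff_ne, ne_eq]
          omega
        rw [hcond, if_pos rfl, ih (a + 1) b (by omega), hcond1]
        rw [if_neg (by simp), if_pos rfl, pyRange_two_cons a b hab]
        norm_num
        congr 1
        ring
      · have hcond : (PySem.Int.mod a 2 == 0) = false := by
          simp only [hmod, beq_eq_false_iff_ne, ne_eq]
          omega
        have hcond1 : (PySem.Int.mod (a + 1) 2 == 0) = true := by
          simp only [hmod1, beq_iff_eq]
          omega
        rw [hcond, if_neg (by simp), ih (a + 1) b (by omega), hcond1]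
        norm_num
    · rw [PySem.List.pyRange_one_eq_nil (by omega)]
      split <;> rw [pyRange_two_nil _ _ (by omega)] <;> rfl

-- filter of the descending unit-step range is the step-(-2) range from the first even
theorem desc_filter (n : Nat) : ∀ a b : Int, (a - b).toNat ≤ n →
    (PySem.List.pyRange a b (-1)).filter (fun x => PySem.Int.mod x 2 == 0) =
    PySem.List.pyRange (if PySem.Int.mod a 2 == 0 then a else a - 1) b (-2) := by
  induction n with
  | zero =>
    intro a b hn
    have hba : a ≤ b := by omega
    rw [PySem.List.pyRange_neg_one_eq_nil hba]
    split <;> rw [pyRange_neg_two_nil _ _ (by omega)] <;> rfl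
  | succ m ih =>
    intro a b hn
    by_cases hab : b < a
    · have hmod : PySem.Int.mod a 2 = a % 2 := PySem.Int.mod_eq_emod_of_pos (by norm_num)
      have hmod1 : PySem.Int.mod (a - 1) 2 = (a - 1) % 2 := PySem.Int.mod_eq_emod_of_pos (by norm_num)
      rw [PySem.List.pyRange_neg_one_cons hab, List.filter_cons]
      by_cases he : a % 2 = 0
      · have hcond : (PySem.Int.mod a 2 == 0) = true := by simp only [hmod, beq_iff_eq]; omega
        have hcond1 : (PySem.Int.mod (a - 1) 2 == 0) = false := by
          simp only [hmod1, beq_eq_false_iff_ne, ne_eq]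
          omega
        rw [hcond, if_pos rfl, ih (a - 1) b (by omega), hcond1]
        rw [if_neg (by simp), if_pos rfl, pyRange_neg_two_cons a b hab]
        norm_num
        congr 1
        ring
      · have hcond : (PySem.Int.mod a 2 == 0) = false := by
          simp only [hmod, beq_eq_false_iff_ne, ne_eq]
          omega
        have hcond1 : (PySem.Int.mod (a - 1) 2 == 0) = true := by
          simp only [hmod1, beq_iff_eq]
          omega
        rw [hcond, if_neg (by simp), ih (a - 1) b (by omega), hcond1]
        norm_num
    · rw [PySem.List.pyRange_neg_one_eq_nil (by omega)]
      split <;> rw [pyRange_neg_two_nil _ _ (by omega)] <;> rfl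

-- A's filtering fold equals B's plain fold over the filtered list
theorem foldA_eq (l : List Int) :
    l.foldl (fun (st : String × Int) num => even_finder num st.1 st.2) ("", 0) =
    (l.filter (fun x => PySem.Int.mod x 2 == 0)).foldl
      (fun (st : String × Int) num => (st.1 ++ (" " ++ PySem.Int.toStr num), st.2 + num)) ("", 0) := by
  rw [List.foldl_filter]
  rfl

theorem fmt_eq (t s : String) :
    ("pass :" ++ t ++ "\n") ++ ("Sum : " ++ s) = "pass :" ++ t ++ "\nSum : " ++ s := by
  rw [← String.append_assoc]
  congr 1
  rw [String.append_assoc]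
  congr 1

-- ===== VERDICT (by name: the statement is the Claim_ definition above) =====
theorem selector_machine_spec : Claim_equal_selector_machine := by
  intro s e _
  unfold Spec_selector_machine selector_machine selector_machine_alt
  by_cases h : e ≥ s
  · simp only [if_pos h]
    rw [foldA_eq, asc_filter (e + 1 - s).toNat s (e + 1) le_rfl]
    exact fmt_eq _ _
  · simp only [if_neg h]
    rw [foldA_eq, desc_filter (s - (e - 1)).toNat s (e - 1) le_rfl]
    exact fmt_eq _ _
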